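-- pv_equiv track=rewrite | github.com/JOVIANpega/TrainingLLM | AI_Complete_Reference/tools/ini_parser_enhanced.py | categorize_setting
-- ===== SOURCE A (Python) =====
-- def categorize_setting(key, value):
--     """分類設定類型"""
--     key_lower = key.lower()
--     value_lower = str(value).lower()
--
--     if any(word in key_lower for word in ['ip', 'address', 'host']):
--         return 'Network'
--     elif any(word in key_lower for word in ['port', 'com', 'baud']):
--         return 'Communication'
--     elif any(word in key_lower for word in ['path', 'file', 'folder']):
--         return 'File_Path'
--     elif any(word in key_lower for word in ['time', 'delay', 'timeout']):
--         return 'Timing'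
--     elif any(word in key_lower for word in ['enable', 'disable', 'on', 'off']):
--         return 'Feature_Flag'
--     elif any(word in key_lower for word in ['model', 'version', 'name']):
--         return 'Device_Info'
--     else:
--         return 'Other'
-- ===== SOURCE B (Python) =====
-- _KEYWORDS = [
--     ('ip', 0), ('address', 0), ('host', 0),
--     ('port', 1), ('com', 1), ('baud', 1),
--     ('path', 2), ('file', 2), ('folder', 2),
--     ('time', 3), ('delay', 3), ('timeout', 3),
--     ('enable', 4), ('disable', 4), ('on', 4), ('off', 4),
--     ('model', 5), ('version', 5), ('name', 5),
-- ]
-- _NAMES = ['Network', 'Communication', 'File_Path', 'Timing',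
--           'Feature_Flag', 'Device_Info']
--
--
-- def categorize_setting(key, value):
--     """分類設定類型 (collect all keyword hits, pick the highest-priority one)"""
--     key_lower = key.lower()
--     str(value).lower()
--     matched = [prio for kw, prio in _KEYWORDS if kw in key_lower]
--     if not matched:
--         return 'Other'
--     return _NAMES[min(matched)]
-- ===== Notes on version B (the rewrite author's own statement) =====
-- stated objective: alternative
-- what changed: A short-circuits through a six-branch if/elif chain of any() tests; B instead collects the priority ranks of ALL matching keywords in one pass without early exit and returns the name of the minimum rank (or 'Other' if none matched).
import Mathlib
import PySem

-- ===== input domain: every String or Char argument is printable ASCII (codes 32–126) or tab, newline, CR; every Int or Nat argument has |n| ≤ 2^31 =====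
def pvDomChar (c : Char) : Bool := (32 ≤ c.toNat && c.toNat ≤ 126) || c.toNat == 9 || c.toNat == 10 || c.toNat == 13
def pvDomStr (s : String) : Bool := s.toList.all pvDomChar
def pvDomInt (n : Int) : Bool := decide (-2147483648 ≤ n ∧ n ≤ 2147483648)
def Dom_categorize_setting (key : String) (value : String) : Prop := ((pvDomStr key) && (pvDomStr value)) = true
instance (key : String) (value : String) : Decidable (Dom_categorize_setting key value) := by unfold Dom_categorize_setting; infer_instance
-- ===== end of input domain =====

-- B replaces A's short-circuiting six-branch if/elif chain by a collect-all pass: gather the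
-- priority ranks of every matching keyword, then return the name of the minimum rank; objective: alternative.

-- ===== PORT A =====
def categorize_setting (key : String) (value : String) : String :=
  let key_lower := PySem.Str.lower key
  let _value_lower := PySem.Str.lower value
  if ["ip", "address", "host"].any (fun w => PySem.Str.isIn w key_lower) then "Network"
  else if ["port", "com", "baud"].any (fun w => PySem.Str.isIn w key_lower) then "Communication"
  else if ["path", "file", "folder"].any (fun w => PySem.Str.isIn w key_lower) then "File_Path"
  else if ["time", "delay", "timeout"].any (fun w => PySem.Str.isIn w key_lower) then "Timing"
  else if ["enable", "disable", "on", "off"].any (fun w => PySem.Str.isIn w key_lower) then "Feature_Flag"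
  else if ["model", "version", "name"].any (fun w => PySem.Str.isIn w key_lower) then "Device_Info"
  else "Other"

-- ===== PORT B =====
def kwTable : List (String × Nat) :=
  [("ip", 0), ("address", 0), ("host", 0),
   ("port", 1), ("com", 1), ("baud", 1),
   ("path", 2), ("file", 2), ("folder", 2),
   ("time", 3), ("delay", 3), ("timeout", 3),
   ("enable", 4), ("disable", 4), ("on", 4), ("off", 4),
   ("model", 5), ("version", 5), ("name", 5)]

def catNames : List String :=
  ["Network", "Communication", "File_Path", "Timing", "Feature_Flag", "Device_Info"]

def categorize_setting_alt (key : String) (value : String) : String :=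
  let key_lower := PySem.Str.lower key
  let _ := PySem.Str.lower value
  let matched := kwTable.filterMap (fun p => if PySem.Str.isIn p.1 key_lower then some p.2 else none)
  match matched.min? with
  | none => "Other"
  | some p => catNames.getD p "Other"

-- ===== PRECONDITION & SPEC =====
def Spec_categorize_setting (key : String) (value : String) (out : String) : Prop := out = categorize_setting_alt key value
instance (key : String) (value : String) (out : String) : Decidable (Spec_categorize_setting key value out) := by unfold Spec_categorize_setting; infer_instance

-- ===== CLAIM =====
def Claim_equal_categorize_setting : Prop := ∀ (key : String) (value : String), Dom_categorize_setting key value → Spec_categorize_setting key value (categorize_setting key value)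

-- ===== LEMMAS AND PROOFS =====
-- folding min over a list everywhere ≥ p keeps p
theorem foldl_min_of_le (p : Nat) : ∀ (ms : List Nat), (∀ m ∈ ms, p ≤ m) → ms.foldl min p = p
  | [], _ => rfl
  | m :: ms, h => by
    simp only [List.foldl_cons, Nat.min_eq_left (h m (List.mem_cons_self ..))]
    exact foldl_min_of_le p ms (fun x hx => h x (List.mem_cons_of_mem _ hx))

-- on a priority-sorted table, the minimum of all matched priorities is the priority of the FIRST match
theorem min_matched_eq_find (key : String) : ∀ (l : List (String × Nat)),
    l.Pairwise (fun a b => a.2 ≤ b.2) →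
    (l.filterMap (fun p => if PySem.Str.isIn p.1 key then some p.2 else none)).min? =
      (l.find? (fun p => PySem.Str.isIn p.1 key)).map Prod.snd
  | [], _ => rfl
  | (kw, p) :: rest, hp => by
    rcases List.pairwise_cons.mp hp with ⟨hle, htail⟩
    by_cases h : PySem.Str.isIn kw key = true
    · rw [List.find?_cons_of_pos (by simpa using h)]
      simp only [List.filterMap_cons, h, if_pos, List.min?_cons', Option.map_some]
      refine congrArg some (foldl_min_of_le p _ ?_)
      intro m hm
      rcases List.mem_filterMap.mp hm with ⟨x, hx, hxm⟩
      split at hxm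
      · exact (Option.some_inj.mp hxm) ▸ hle x hx
      · exact absurd hxm (by simp)
    · rw [List.find?_cons_of_neg (by simpa using h)]
      simp only [List.filterMap_cons, h]
      exact min_matched_eq_find key rest htail

theorem ite_or_split (p q : Bool) (X r : String) :
    (if p || q then X else r) = if p then X else if q then X else r := by
  cases p <;> simp

-- ===== VERDICT =====
theorem categorize_setting_spec : Claim_equal_categorize_setting := by
  intro key value _
  unfold Spec_categorize_setting categorize_setting categorize_setting_alt
  simp only [min_matched_eq_find (PySem.Str.lower key) kwTable (by decide)]
  simp only [kwTable, catNames, List.find?, List.any_cons, List.any_nil, Bool.or_false,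
    ite_or_split]
  simp only [PySem.Str.isIn_eq]
  by_cases h1 : PySem.Chars.isIn ['i', 'p'] (PySem.Chars.lower key.toList) = true
  · simp [h1]
  by_cases h2 : PySem.Chars.isIn ['a', 'd', 'd', 'r', 'e', 's', 's'] (PySem.Chars.lower key.toList) = true
  · simp [h1, h2]
  by_cases h3 : PySem.Chars.isIn ['h', 'o', 's', 't'] (PySem.Chars.lower key.toList) = true
  · simp [h1, h2, h3]
  by_cases h4 : PySem.Chars.isIn ['p', 'o', 'r', 't'] (PySem.Chars.lower key.toList) = true
  · simp [h1, h2, h3, h4]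
  by_cases h5 : PySem.Chars.isIn ['c', 'o', 'm'] (PySem.Chars.lower key.toList) = true
  · simp [h1, h2, h3, h4, h5]
  by_cases h6 : PySem.Chars.isIn ['b', 'a', 'u', 'd'] (PySem.Chars.lower key.toList) = true
  · simp [h1, h2, h3, h4, h5, h6]
  by_cases h7 : PySem.Chars.isIn ['p', 'a', 't', 'h'] (PySem.Chars.lower key.toList) = true
  · simp [h1, h2, h3, h4, h5, h6, h7]
  by_cases h8 : PySem.Chars.isIn ['f', 'i', 'l', 'e'] (PySem.Chars.lower key.toList) = true
  · simp [h1, h2, h3, h4, h5, h6, h7, h8]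
  by_cases h9 : PySem.Chars.isIn ['f', 'o', 'l', 'd', 'e', 'r'] (PySem.Chars.lower key.toList) = true
  · simp [h1, h2, h3, h4, h5, h6, h7, h8, h9]
  by_cases h10 : PySem.Chars.isIn ['t', 'i', 'm', 'e'] (PySem.Chars.lower key.toList) = true
  · simp [h1, h2, h3, h4, h5, h6, h7, h8, h9, h10]
  by_cases h11 : PySem.Chars.isIn ['d', 'e', 'l', 'a', 'y'] (PySem.Chars.lower key.toList) = true
  · simp [h1, h2, h3, h4, h5, h6, h7, h8, h9, h10, h11]
  by_cases h12 : PySem.Chars.isIn ['t', 'i', 'm', 'e', 'o', 'u', 't'] (PySem.Chars.lower key.toList) = true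
  · simp [h1, h2, h3, h4, h5, h6, h7, h8, h9, h10, h11, h12]
  by_cases h13 : PySem.Chars.isIn ['e', 'n', 'a', 'b', 'l', 'e'] (PySem.Chars.lower key.toList) = true
  · simp [h1, h2, h3, h4, h5, h6, h7, h8, h9, h10, h11, h12, h13]
  by_cases h14 : PySem.Chars.isIn ['d', 'i', 's', 'a', 'b', 'l', 'e'] (PySem.Chars.lower key.toList) = true
  · simp [h1, h2, h3, h4, h5, h6, h7, h8, h9, h10, h11, h12, h13, h14]
  by_cases h15 : PySem.Chars.isIn ['o', 'n'] (PySem.Chars.lower key.toList) = true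
  · simp [h1, h2, h3, h4, h5, h6, h7, h8, h9, h10, h11, h12, h13, h14, h15]
  by_cases h16 : PySem.Chars.isIn ['o', 'f', 'f'] (PySem.Chars.lower key.toList) = true
  · simp [h1, h2, h3, h4, h5, h6, h7, h8, h9, h10, h11, h12, h13, h14, h15, h16]
  by_cases h17 : PySem.Chars.isIn ['m', 'o', 'd', 'e', 'l'] (PySem.Chars.lower key.toList) = true
  · simp [h1, h2, h3, h4, h5, h6, h7, h8, h9, h10, h11, h12, h13, h14, h15, h16, h17]
  by_cases h18 : PySem.Chars.isIn ['v', 'e', 'r', 's', 'i', 'o', 'n'] (PySem.Chars.lower key.toList) = true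
  · simp [h1, h2, h3, h4, h5, h6, h7, h8, h9, h10, h11, h12, h13, h14, h15, h16, h17, h18]
  by_cases h19 : PySem.Chars.isIn ['n', 'a', 'm', 'e'] (PySem.Chars.lower key.toList) = true
  · simp [h1, h2, h3, h4, h5, h6, h7, h8, h9, h10, h11, h12, h13, h14, h15, h16, h17, h18, h19]
  simp [h1, h2, h3, h4, h5, h6, h7, h8, h9, h10, h11, h12, h13, h14, h15, h16, h17, h18, h19]
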